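-- pv_equiv track=rewrite | github.com/KEUMIN/algorithm_2024 | hashtable/word_relay.py | solution
-- ===== SOURCE A (Python) =====
-- from collections import defaultdict
--
-- def solution(n, words):
--     word_dict = defaultdict(int)
--     start_char = words[0][0]
--
--     for i, word in enumerate(words):
--         if word_dict[word] > 0 or start_char != word[0]:
--             return [(i%n) + 1, (i//n) + 1]
--         else:
--             word_dict[word] += 1
--             start_char = word[len(word) - 1]
--
--     return [0,0]
-- ===== SOURCE B (Python) =====
-- def solution(n, words):
--     m = len(words)
--     breaks = [i for i, (u, v) in enumerate(zip(words, words[1:]), 1) if v[0] != u[-1]]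
--     chain_fail = breaks[0] if breaks else m
--     dup_fail = m
--     seen = set()
--     for i, w in enumerate(words):
--         if w in seen:
--             dup_fail = i
--             break
--         seen.add(w)
--     j = min(chain_fail, dup_fail)
--     if j == m:
--         return [0, 0]
--     return [(j % n) + 1, (j // n) + 1]
-- ===== Notes on version B (the rewrite author's own statement) =====
-- stated objective: alternative
-- what changed: Replaces A's single stateful scan (defaultdict counter plus a running start_char updated in the loop) by two independent first-failure scans over the whole list - the first chain-break index over consecutive word pairs and the first duplicate index via a growing seen-set - combined by taking the minimum index.
-- outside the precondition, e.g. on solution(0, ['ab', 'bc']): A returns [0, 0], B returns [0, 0]; on solution(3, ['ab', 'ba', 'ab', '']): A returns [3, 1], B raises IndexError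
import Mathlib
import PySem

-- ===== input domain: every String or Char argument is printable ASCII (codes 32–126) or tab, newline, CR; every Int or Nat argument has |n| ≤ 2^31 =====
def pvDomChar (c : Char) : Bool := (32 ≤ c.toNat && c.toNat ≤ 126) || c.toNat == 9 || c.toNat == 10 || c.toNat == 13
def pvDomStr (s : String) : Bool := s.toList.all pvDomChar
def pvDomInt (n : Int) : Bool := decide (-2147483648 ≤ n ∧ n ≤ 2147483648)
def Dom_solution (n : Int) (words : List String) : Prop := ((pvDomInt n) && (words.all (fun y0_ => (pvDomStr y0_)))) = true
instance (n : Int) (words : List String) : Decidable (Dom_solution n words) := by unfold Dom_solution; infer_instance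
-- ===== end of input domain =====

-- B replaces A's single stateful scan by two independent first-failure scans (chain breaks, duplicates)
-- combined with min — an alternative decomposition, same asymptotic cost; return value only (no mutation).

-- ===== PORT A =====
-- w[0]; the default ' ' is reached only for w = "", which Pre_ excludes (Python raises IndexError there)
def pvFirstChar (w : String) : Char := (PySem.Str.pyGet? w 0).getD ' '
-- word[len(word) - 1]; the default is reached only for w = "", excluded by Pre_
def pvLastCharA (w : String) : Char := (PySem.Str.pyGet? w (PySem.Str.len w - 1)).getD ' '

def solutionGo (n : Int) (dict : PySem.Dict String Int) (startChar : Char) (i : Nat) :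
    List String → List Int
  | [] => [0, 0]
  | w :: rest =>
    if dict.getD w 0 > 0 ∨ startChar ≠ pvFirstChar w then
      [PySem.Int.mod (i : Int) n + 1, PySem.Int.floordiv (i : Int) n + 1]
    else
      solutionGo n (dict.modify w 0 (· + 1)) (pvLastCharA w) (i + 1) rest

-- words[0] is words.headD ""; Pre_ excludes words = [], where Python raises IndexError
def solution (n : Int) (words : List String) : List Int :=
  solutionGo n PySem.Dict.empty (pvFirstChar (words.headD "")) 0 words

-- ===== PORT B =====
-- word[-1]; the default is reached only for w = "", excluded by Pre_
def pvLastCharB (w : String) : Char := (PySem.Str.pyGet? w (-1)).getD ' '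

-- [i for i, (u, v) in enumerate(zip(words, words[1:]), 1) if v[0] != u[-1]]
def pvBreaks (i : Nat) : List (String × String) → List Nat
  | [] => []
  | (u, v) :: rest =>
    if pvFirstChar v ≠ pvLastCharB u then i :: pvBreaks (i + 1) rest
    else pvBreaks (i + 1) rest

-- the enumerate/seen-set loop with break; returns m when no duplicate is found
def dupScan (seen : PySem.Set String) (i : Nat) : List String → Nat
  | [] => i
  | w :: rest =>
    if PySem.Set.contains seen w then i else dupScan (PySem.Set.add seen w) (i + 1) rest

def solution_alt (n : Int) (words : List String) : List Int :=
  let m := words.length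
  let breaks := pvBreaks 1 (words.zip (words.drop 1))
  -- breaks[0] if breaks else m
  let chainFail := breaks.headD m
  let dupFail := dupScan PySem.Set.empty 0 words
  let j := min chainFail dupFail
  if j = m then [0, 0]
  else [PySem.Int.mod (j : Int) n + 1, PySem.Int.floordiv (j : Int) n + 1]

-- ===== PRECONDITION & SPEC =====
-- Pre_ excludes: words = [] and empty-string words (Python A indexes w[0]/w[-1] and raises IndexError on
-- the ones it reaches; A does return when an empty word sits beyond its stopping index — that excluded
-- returning corner is cited in claim.json), and n = 0 (A raises ZeroDivisionError whenever a failure exists).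
def Pre_solution (n : Int) (words : List String) : Prop :=
  words ≠ [] ∧ (∀ w ∈ words, w ≠ "") ∧ n ≠ 0
instance (n : Int) (words : List String) : Decidable (Pre_solution n words) := by
  unfold Pre_solution; infer_instance

def pvWitness_solution : Int × List String := (1, ["ab", "bc"])

def Spec_solution (n : Int) (words : List String) (out : List Int) : Prop := out = solution_alt n words
instance (n : Int) (words : List String) (out : List Int) : Decidable (Spec_solution n words out) := by
  unfold Spec_solution; infer_instance

-- ===== CLAIM (what is proved, stated in full; the proofs are below) =====
def Claim_equal_solution : Prop := ∀ (n : Int) (words : List String),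
  Dom_solution n words → Pre_solution n words → Spec_solution n words (solution n words)


-- ===== LEMMAS AND PROOFS =====

def pvOut (n : Int) (m j : Nat) : List Int :=
  if j = m then [0, 0]
  else [PySem.Int.mod (j : Int) n + 1, PySem.Int.floordiv (j : Int) n + 1]

lemma pvLast_eq (w : String) (hw : w ≠ "") : pvLastCharA w = pvLastCharB w := by
  have h : w.toList ≠ [] := by
    intro h
    exact hw (by simpa using congrArg String.ofList h)
  have hl : 1 ≤ w.length :=
    Nat.one_le_of_lt (Nat.lt_of_lt_of_le (List.length_pos_iff.mpr h) (le_refl _))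
  simp [pvLastCharA, pvLastCharB, PySem.Str.pyGet?, PySem.Chars.pyGet?_eq_listPyGet?,
    PySem.List.pyGet?, PySem.List.pyIdx?, PySem.Str.len, hl]

lemma breaks_mem_ge (l : List (String × String)) :
    ∀ (i : Nat), ∀ x ∈ pvBreaks i l, i ≤ x := by
  induction l with
  | nil => intro i x hx; simp [pvBreaks] at hx
  | cons p rest ih =>
    obtain ⟨u, v⟩ := p
    intro i x hx
    rw [pvBreaks] at hx
    split at hx
    · rcases List.mem_cons.mp hx with rfl | hx
      · exact le_refl x
      · exact le_trans (Nat.le_succ i) (ih (i + 1) x hx)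
    · exact le_trans (Nat.le_succ i) (ih (i + 1) x hx)

lemma chainFail_ge (m i : Nat) (l : List (String × String)) (h : i ≤ m) :
    i ≤ (pvBreaks i l).headD m := by
  cases hb : pvBreaks i l with
  | nil => simpa using h
  | cons a t => simpa using breaks_mem_ge l i a (hb ▸ List.mem_cons_self)

lemma dupScan_ge (seen : PySem.Set String) (i : Nat) (l : List String) :
    i ≤ dupScan seen i l := by
  induction l generalizing seen i with
  | nil => simp [dupScan]
  | cons w rest ih =>
    rw [dupScan]
    split
    · exact le_refl i
    · exact le_trans (Nat.le_succ i) (ih _ _)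

lemma headD_drop_mem (words : List String) (k : Nat) (h : k < words.length) :
    (words.drop k).headD "" ∈ words := by
  rw [List.drop_eq_getElem_cons h]
  simp [List.getElem?_eq_getElem h]

lemma go_eq (n : Int) (words : List String) (hw : ∀ w ∈ words, w ≠ "") :
    ∀ (suf : List String) (i : Nat) (dict : PySem.Dict String Int) (seen : PySem.Set String)
      (sc : Char),
      i ≤ words.length → words.drop i = suf →
      (∀ w, dict.getD w 0 = (if w ∈ seen then 1 else 0)) →
      (sc = if i = 0 then pvFirstChar (words.headD "")
            else pvLastCharA ((words.drop (i - 1)).headD "")) →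
      solutionGo n dict sc i suf =
        pvOut n words.length
          (min ((pvBreaks (max 1 i)
                  ((words.drop (max 1 i - 1)).zip (words.drop (max 1 i)))).headD words.length)
               (dupScan seen i suf)) := by
  intro suf
  induction suf generalizing words with
  | nil =>
    intro i dict seen sc hile hdrop hinv hsc
    have hlen : words.length ≤ i := List.drop_eq_nil_iff.mp hdrop
    have hi : i = words.length := le_antisymm hile hlen
    subst hi
    have hz : words.drop (max 1 words.length) = [] := List.drop_eq_nil_iff.mpr (by omega)
    rw [hz, List.zip_nil_right, solutionGo, pvBreaks, List.headD_nil, dupScan, Nat.min_self,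
      pvOut, if_pos rfl]
  | cons w rest ih =>
    intro i dict seen sc hile hdrop hinv hsc
    have hlen : (words.drop i).length = words.length - i := List.length_drop
    have hi : i < words.length := by rw [hdrop] at hlen; simp at hlen; omega
    have hmem : w ∈ words := List.mem_of_mem_drop (by rw [hdrop]; exact List.mem_cons_self)
    have hwne : w ≠ "" := hw w hmem
    have hw0 : (words.drop i).headD "" = w := by rw [hdrop]; rfl
    have hrest : words.drop (i + 1) = rest := by
      have h := congrArg List.tail hdrop
      rw [List.tail_drop] at h
      exact h
    -- the one-step unfolding of the chain-break list at a position 1 ≤ k < length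
    have hchain_step : ∀ (k : Nat), 1 ≤ k → k < words.length →
        (pvBreaks k ((words.drop (k - 1)).zip (words.drop k))).headD words.length =
          (if pvFirstChar ((words.drop k).headD "") ≠ pvLastCharB ((words.drop (k - 1)).headD "")
           then k
           else (pvBreaks (k + 1) ((words.drop k).zip (words.drop (k + 1)))).headD
                  words.length) := by
      intro k hk1 hklt
      have hk1lt : k - 1 < words.length := by omega
      have e1 : words.drop (k - 1) = words[k - 1] :: words.drop k := by
        have h := List.drop_eq_getElem_cons hk1lt
        rwa [show k - 1 + 1 = k from by omega] at h
      have e2 : words.drop k = words[k] :: words.drop (k + 1) :=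
        List.drop_eq_getElem_cons hklt
      rw [e1, e2, List.zip_cons_cons, pvBreaks]
      simp only [List.headD_cons]
      split <;> rfl
    by_cases hws : w ∈ seen
    · -- duplicate found at index i: A stops, B's dup scan stops at i, chain index is ≥ i
      have hcond : dict.getD w 0 > 0 := by rw [hinv w, if_pos hws]; norm_num
      have hd : dupScan seen i (w :: rest) = i := by
        rw [dupScan, if_pos (by simpa [PySem.Set.contains_iff] using hws)]
      have hc : i ≤ (pvBreaks (max 1 i)
          ((words.drop (max 1 i - 1)).zip (words.drop (max 1 i)))).headD words.length := by
        have := chainFail_ge words.length (max 1 i)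
          ((words.drop (max 1 i - 1)).zip (words.drop (max 1 i))) (by omega)
        omega
      rw [solutionGo, if_pos (Or.inl hcond), hd, Nat.min_eq_right hc, pvOut,
        if_neg (by omega)]
    · by_cases hsc2 : sc = pvFirstChar w
      · -- both checks pass at index i: both sides move on to index i + 1
        have hd : dupScan seen i (w :: rest) = dupScan (PySem.Set.add seen w) (i + 1) rest := by
          rw [dupScan, if_neg (by simpa [PySem.Set.contains_iff] using hws)]
        have hinv' : ∀ w', (dict.modify w 0 (· + 1)).getD w' 0 =
            (if w' ∈ PySem.Set.add seen w then 1 else 0) := by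
          intro w'
          rw [PySem.Dict.getD_modify]
          by_cases hww : w' = w
          · subst hww
            rw [if_pos rfl, hinv w', if_neg hws,
              if_pos (by simp [PySem.Set.mem_add])]
            norm_num
          · rw [if_neg hww, hinv w']
            by_cases h2 : w' ∈ seen
            · rw [if_pos h2, if_pos (by simp [PySem.Set.mem_add, h2])]
            · rw [if_neg h2, if_neg (by simp [PySem.Set.mem_add, h2, hww])]
        have hstep := ih words hw (i + 1) (dict.modify w 0 (· + 1)) (PySem.Set.add seen w)
          (pvLastCharA w) hi hrest hinv'
          (by rw [if_neg (Nat.succ_ne_zero i), Nat.add_sub_cancel, hw0])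
        have hcs : (pvBreaks (max 1 i)
              ((words.drop (max 1 i - 1)).zip (words.drop (max 1 i)))).headD words.length =
            (pvBreaks (max 1 (i + 1))
              ((words.drop (max 1 (i + 1) - 1)).zip (words.drop (max 1 (i + 1))))).headD
              words.length := by
          rcases Nat.eq_zero_or_pos i with h0 | h1
          · subst h0; rfl
          · have hmi : max 1 i = i := Nat.max_eq_right h1
            have hmi1 : max 1 (i + 1) = i + 1 := Nat.max_eq_right (by omega)
            have hu : (words.drop (i - 1)).headD "" ∈ words := headD_drop_mem words (i - 1) (by omega)
            have hlast : pvLastCharA ((words.drop (i - 1)).headD "") =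
                pvLastCharB ((words.drop (i - 1)).headD "") := pvLast_eq _ (hw _ hu)
            rw [hmi, hmi1, hchain_step i h1 hi, if_neg (by
              rw [hw0, ← hlast, ne_eq, not_not]
              rw [hsc, if_neg (by omega)] at hsc2
              exact hsc2.symm), Nat.add_sub_cancel]
        rw [solutionGo, if_neg (by
          push_neg
          constructor
          · rw [hinv w, if_neg hws]
          · simpa using hsc2), hstep, hd, hcs]
      · -- chain break at index i (i = 0 is impossible: there sc IS words[0][0])
        have hine : 1 ≤ i := by
          rcases Nat.eq_zero_or_pos i with h0 | h1
          · exfalso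
            apply hsc2
            rw [hsc, if_pos h0]
            have : words.headD "" = w := by
              have := hw0
              rw [show words.drop i = words from by rw [h0]; rfl] at this
              exact this
            rw [this]
          · exact h1
        have hu : (words.drop (i - 1)).headD "" ∈ words := headD_drop_mem words (i - 1) (by omega)
        have hlast : pvLastCharA ((words.drop (i - 1)).headD "") =
            pvLastCharB ((words.drop (i - 1)).headD "") := pvLast_eq _ (hw _ hu)
        have hmi : max 1 i = i := Nat.max_eq_right hine
        have hc : (pvBreaks (max 1 i)
            ((words.drop (max 1 i - 1)).zip (words.drop (max 1 i)))).headD words.length = i := by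
          rw [hmi, hchain_step i hine hi, if_pos (by
            rw [hw0, ← hlast]
            intro he
            apply hsc2
            rw [hsc, if_neg (by omega), he])]
        have hd : i + 1 ≤ dupScan seen i (w :: rest) := by
          rw [dupScan, if_neg (by simpa [PySem.Set.contains_iff] using hws)]
          exact dupScan_ge _ _ _
        rw [solutionGo, if_pos (Or.inr (by simpa using hsc2)), hc,
          Nat.min_eq_left (by omega), pvOut, if_neg (by omega)]

-- ===== VERDICT (by name: the statement is the Claim_ definition above) =====
theorem solution_spec : Claim_equal_solution := by
  intro n words _ hpre
  obtain ⟨hne, hw, hn⟩ := hpre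
  unfold Spec_solution
  have h := go_eq n words hw words 0 PySem.Dict.empty PySem.Set.empty
    (pvFirstChar (words.headD "")) (by omega) rfl
    (by intro w; simp [PySem.Dict.getD_empty, PySem.Set.empty]) (by simp)
  rw [solution, h]
  simp [solution_alt, pvOut, PySem.Set.empty]
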